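-- pv_equiv track=rewrite | github.com/totoLab/code-ingegneria-informatica | fondamentiDiInformatica1/argomenti/listeTuple/28ott/lista_vettori.py | genera_lista
-- ===== SOURCE A (Python) =====
-- def genera_lista(v1, v2):
--     v3 = []
--     for i in range(len(v1)):
--         if i%2 == 0:
--             v3.append(gen_new_element(v1, i, "sum"))
--         else:
--             v3.append(gen_new_element(v2, i, "multiplication"))
--
--     return v3
--
-- def gen_new_element(v, start_range, operation):
--     if operation == "sum":
--         element = 0
--         for i in range(start_range + 1, len(v)):
--             element += v[i]
--
--     elif operation == "multiplication":
--         element = 1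
--         for i in range(start_range + 1, len(v)):
--             element *= v[i]
--
--     return element
-- ===== SOURCE B (Python) =====
-- def genera_lista(v1, v2):
--     # Suffix sums of v1 and suffix products of v2, each built in one backward pass,
--     # then each output element is a single O(1) lookup.
--     ss = [0]
--     for x in reversed(v1):
--         ss.append(x + ss[-1])
--     ss.reverse()
--     sp = [1]
--     for x in reversed(v2):
--         sp.append(x * sp[-1])
--     sp.reverse()
--     return [ss[i + 1] if i % 2 == 0 else (sp[i + 1] if i + 1 < len(sp) else 1)
--             for i in range(len(v1))]
-- ===== Notes on version B (the rewrite author's own statement) =====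
-- stated objective: faster
-- what changed: A rescans the tail of v1/v2 for every index (O(n^2)); B precomputes the suffix-sum array of v1 and the suffix-product array of v2 in one backward pass each and answers every index with an O(1) lookup.
import Mathlib
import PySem

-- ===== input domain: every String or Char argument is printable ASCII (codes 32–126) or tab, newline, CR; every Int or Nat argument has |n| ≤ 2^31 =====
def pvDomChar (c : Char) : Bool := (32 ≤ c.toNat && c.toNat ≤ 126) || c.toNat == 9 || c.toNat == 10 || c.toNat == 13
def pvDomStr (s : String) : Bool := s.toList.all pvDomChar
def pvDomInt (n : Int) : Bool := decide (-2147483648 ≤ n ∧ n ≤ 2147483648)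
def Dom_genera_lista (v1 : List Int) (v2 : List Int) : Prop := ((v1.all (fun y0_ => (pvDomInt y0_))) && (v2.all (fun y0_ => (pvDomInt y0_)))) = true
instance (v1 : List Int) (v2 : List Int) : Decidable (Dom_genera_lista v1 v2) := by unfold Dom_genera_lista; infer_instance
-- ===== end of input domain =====

-- B replaces A's per-index rescans by suffix-sum/suffix-product arrays built in one
-- backward pass each (O(n) instead of O(n^2)); objective: faster.

-- ===== PORT A =====
-- literal port of gen_new_element; the final 0 is unreachable for A's callers
-- (Python would raise UnboundLocalError on any other operation string)
def gen_new_element (v : List Int) (start_range : Int) (operation : String) : Int :=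
  if operation = "sum" then
    (PySem.List.pyRange (start_range + 1) (v.length : Int) 1).foldl
      (fun element i => element + PySem.List.pyGetD v i 0) 0
  else if operation = "multiplication" then
    (PySem.List.pyRange (start_range + 1) (v.length : Int) 1).foldl
      (fun element i => element * PySem.List.pyGetD v i 0) 1
  else 0

def genera_lista (v1 : List Int) (v2 : List Int) : List Int :=
  (PySem.List.pyRange 0 (v1.length : Int) 1).foldl
    (fun v3 i =>
      if PySem.Int.mod i 2 = 0 then v3 ++ [gen_new_element v1 i "sum"]
      else v3 ++ [gen_new_element v2 i "multiplication"]) []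

-- ===== PORT B =====
def genera_lista_alt (v1 : List Int) (v2 : List Int) : List Int :=
  let ss := v1.foldr (fun x r => (x + r.headD 0) :: r) [0]
  let sp := v2.foldr (fun x r => (x * r.headD 1) :: r) [1]
  (List.range v1.length).map (fun i =>
    if i % 2 = 0 then ss.getD (i + 1) 0
    else if i + 1 < sp.length then sp.getD (i + 1) 1 else 1)

-- ===== PRECONDITION & SPEC =====
def Spec_genera_lista (v1 : List Int) (v2 : List Int) (out : List Int) : Prop := out = genera_lista_alt v1 v2
instance (v1 : List Int) (v2 : List Int) (out : List Int) : Decidable (Spec_genera_lista v1 v2 out) := by unfold Spec_genera_lista; infer_instance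

-- ===== CLAIM (what is proved, stated in full; the proofs are below) =====
def Claim_equal_genera_lista : Prop := ∀ (v1 : List Int) (v2 : List Int), Dom_genera_lista v1 v2 → Spec_genera_lista v1 v2 (genera_lista v1 v2)

-- ===== LEMMAS AND PROOFS =====

lemma sufAdd_getD (v : List Int) (k : Nat) :
    (v.foldr (fun x r => (x + r.headD 0) :: r) [0]).getD k 0 = (v.drop k).sum := by
  induction v generalizing k with
  | nil => cases k <;> simp
  | cons x xs ih =>
    cases k with
    | zero =>
      rw [List.foldr_cons, List.getD_cons_zero, List.drop_zero, List.sum_cons,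
        List.headD_eq_head?_getD, List.head?_eq_getElem?, ← List.getD_eq_getElem?_getD]
      rw [show (List.foldr (fun x r => (x + r.headD 0) :: r) [0] xs).getD 0 0 = (xs.drop 0).sum from ih 0,
        List.drop_zero]
    | succ n => simpa using ih n

lemma sufMul_getD (v : List Int) (k : Nat) :
    (v.foldr (fun x r => (x * r.headD 1) :: r) [1]).getD k 1 = (v.drop k).prod := by
  induction v generalizing k with
  | nil => cases k <;> simp
  | cons x xs ih =>
    cases k with
    | zero =>
      rw [List.foldr_cons, List.getD_cons_zero, List.drop_zero, List.prod_cons,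
        List.headD_eq_head?_getD, List.head?_eq_getElem?, ← List.getD_eq_getElem?_getD]
      rw [show (List.foldr (fun x r => (x * r.headD 1) :: r) [1] xs).getD 0 1 = (xs.drop 0).prod from ih 0,
        List.drop_zero]
    | succ n => simpa using ih n

lemma sufMul_length (v : List Int) :
    (v.foldr (fun x r => (x * r.headD 1) :: r) [1]).length = v.length + 1 := by
  induction v with
  | nil => simp
  | cons x xs ih => rw [List.foldr_cons, List.length_cons, ih, List.length_cons]

lemma sufMul_getD' (v : List Int) (k : Nat) :
    (if k < (v.foldr (fun x r => (x * r.headD 1) :: r) [1]).length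
     then (v.foldr (fun x r => (x * r.headD 1) :: r) [1]).getD k 1 else 1)
      = (v.drop k).prod := by
  split
  · exact sufMul_getD v k
  · rename_i h
    rw [sufMul_length] at h
    rw [List.drop_eq_nil_of_le (by omega)]
    simp

lemma foldl_mull (xs : List Int) (init : Int) :
    xs.foldl (fun a x => a * x) init = init * xs.prod := by
  induction xs generalizing init with
  | nil => simp
  | cons y ys ih => simp [ih, mul_assoc]

lemma foldl_addl (xs : List Int) (init : Int) :
    xs.foldl (fun a x => a + x) init = init + xs.sum := by
  induction xs generalizing init with
  | nil => simp
  | cons y ys ih => simp [ih]; ring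

lemma gen_sum (v : List Int) (k : Nat) :
    gen_new_element v (k : Int) "sum" = (v.drop (k + 1)).sum := by
  unfold gen_new_element
  rw [if_pos rfl,
    PySem.List.foldl_pyRange_pyGetD' v 0 (fun a x => a + x) 0 (a := (k : Int) + 1) (by positivity),
    foldl_addl]
  norm_num

lemma gen_mul (v : List Int) (k : Nat) :
    gen_new_element v (k : Int) "multiplication" = (v.drop (k + 1)).prod := by
  unfold gen_new_element
  rw [if_neg (by decide), if_pos rfl,
    PySem.List.foldl_pyRange_pyGetD' v 0 (fun a x => a * x) 1 (a := (k : Int) + 1) (by positivity),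
    foldl_mull]
  norm_num

-- ===== VERDICT (by name: the statement is the Claim_ definition above) =====
theorem genera_lista_spec : Claim_equal_genera_lista := by
  intro v1 v2 _
  unfold Spec_genera_lista genera_lista genera_lista_alt
  have hbody : (fun (v3 : List Int) (i : Int) =>
      if PySem.Int.mod i 2 = 0 then v3 ++ [gen_new_element v1 i "sum"]
      else v3 ++ [gen_new_element v2 i "multiplication"])
      = fun v3 i => v3 ++ [if PySem.Int.mod i 2 = 0 then gen_new_element v1 i "sum"
                           else gen_new_element v2 i "multiplication"] := by
    funext v3 i; split <;> rfl
  rw [hbody, PySem.List.pyRange_zero_nat, List.foldl_map,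
    PySem.List.foldl_append_singleton_eq_map]
  simp only [List.nil_append]
  refine List.map_congr_left (fun k _ => ?_)
  have hm : PySem.Int.mod (k : Int) 2 = ((k % 2 : Nat) : Int) := by
    exact_mod_cast PySem.Int.mod_natCast k 2
  rw [hm]
  by_cases h : k % 2 = 0
  · rw [if_pos (show ((k % 2 : Nat) : Int) = 0 by rw [h]; rfl), if_pos h, gen_sum, sufAdd_getD]
  · rw [if_neg (show ¬((k % 2 : Nat) : Int) = 0 by exact_mod_cast h), if_neg h, gen_mul,
      sufMul_getD' v2 (k + 1)]
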